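-- pv_equiv track=rewrite | github.com/KimJuu/autoProgram | kiwoom_condition_trader.py | _split_quantity
-- ===== SOURCE A (Python) =====
-- from typing import Dict, List, Optional, Set, Tuple
--
-- def _split_quantity(total: int, lot: int) -> List[int]:
--     """Return a list of child order sizes based on available depth."""
--     if lot <= 0:
--         return [total]
--     parts = []
--     remaining = total
--     while remaining > 0:
--         chunk = min(lot, remaining)
--         parts.append(chunk)
--         remaining -= chunk
--     return parts
-- ===== SOURCE B (Python) =====
-- def _split_quantity(total: int, lot: int):
--     if lot <= 0:
--         return [total]
--     if total <= 0:
--         return []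
--     q, r = divmod(total, lot)
--     return [lot] * q + ([r] if r else [])
-- ===== Notes on version B (the rewrite author's own statement) =====
-- stated objective: simpler
-- what changed: Replaces the subtraction loop with closed-form divmod arithmetic: q full lots by list multiplication plus the nonzero remainder.
import Mathlib
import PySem

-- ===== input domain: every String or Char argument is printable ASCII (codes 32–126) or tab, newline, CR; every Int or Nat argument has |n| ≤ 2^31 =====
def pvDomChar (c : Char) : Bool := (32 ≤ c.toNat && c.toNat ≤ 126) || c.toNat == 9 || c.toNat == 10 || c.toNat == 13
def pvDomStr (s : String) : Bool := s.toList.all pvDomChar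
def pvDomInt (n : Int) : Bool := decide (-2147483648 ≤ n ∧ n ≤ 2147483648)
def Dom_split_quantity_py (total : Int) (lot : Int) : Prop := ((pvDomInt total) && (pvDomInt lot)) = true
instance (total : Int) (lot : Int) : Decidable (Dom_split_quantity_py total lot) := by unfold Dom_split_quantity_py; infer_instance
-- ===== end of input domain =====

-- B replaces A's repeated-subtraction loop with closed-form divmod arithmetic (simpler; same outputs).

-- ===== PORT A =====
-- the 'while remaining > 0' loop of A; only entered with 0 < lot (A's guard returned otherwise)
def pvALoop (lot remaining : Int) (hl : 0 < lot) : List Int :=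
  if _h : 0 < remaining then
    let chunk := min lot remaining
    chunk :: pvALoop lot (remaining - chunk) hl
  else []
termination_by remaining.toNat
decreasing_by omega

def split_quantity_py (total : Int) (lot : Int) : List Int :=
  if h : lot ≤ 0 then [total]
  else pvALoop lot total (by omega)

-- ===== PORT B =====
def split_quantity_py_alt (total : Int) (lot : Int) : List Int :=
  if lot ≤ 0 then [total]
  else if total ≤ 0 then []
  else
    let q := PySem.Int.floordiv total lot
    let r := PySem.Int.mod total lot
    List.replicate q.toNat lot ++ (if r = 0 then [] else [r])

-- ===== PRECONDITION & SPEC =====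
def Spec_split_quantity_py (total : Int) (lot : Int) (out : List Int) : Prop := out = split_quantity_py_alt total lot
instance (total : Int) (lot : Int) (out : List Int) : Decidable (Spec_split_quantity_py total lot out) := by unfold Spec_split_quantity_py; infer_instance

-- ===== CLAIM (what is proved, stated in full; the proofs are below) =====
def Claim_equal_split_quantity_py : Prop := ∀ (total : Int) (lot : Int), Dom_split_quantity_py total lot → Spec_split_quantity_py total lot (split_quantity_py total lot)

-- ===== LEMMAS AND PROOFS =====

lemma pvALoop_eq (lot : Int) (hl : 0 < lot) :
    ∀ (n : Nat) (r : Int), r.toNat ≤ n → 0 < r →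
      pvALoop lot r hl =
        List.replicate (PySem.Int.floordiv r lot).toNat lot ++
          (if PySem.Int.mod r lot = 0 then [] else [PySem.Int.mod r lot]) := by
  intro n
  induction n with
  | zero => intro r h hr; omega
  | succ n ih =>
    intro r h hr
    rw [pvALoop.eq_def]
    simp only [hr, dif_pos]
    by_cases hle : r ≤ lot
    · have hmin : min lot r = r := by omega
      rw [hmin]
      rw [pvALoop.eq_def]
      simp only [sub_self, lt_irrefl]
      by_cases heq : r = lot
      · -- r = lot
        have hq : PySem.Int.floordiv r lot = 1 := by
          rw [PySem.Int.floordiv_eq_iff_of_pos hl]; constructor <;> omega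
        have hm : PySem.Int.mod r lot = 0 := by
          have := PySem.Int.floordiv_mul_add_mod r lot
          rw [hq] at this; omega
        simp [hq, hm]
        exact heq
      · -- r < lot
        have hq : PySem.Int.floordiv r lot = 0 := by
          rw [PySem.Int.floordiv_eq_iff_of_pos hl]; constructor <;> omega
        have hm : PySem.Int.mod r lot = r := by
          have := PySem.Int.floordiv_mul_add_mod r lot
          rw [hq] at this; omega
        simp [hq, hm]; omega
    · -- lot < r
      have hmin : min lot r = lot := by omega
      rw [hmin]
      rw [ih (r - lot) (by omega) (by omega)]
      have hdpos : 0 < lot := hl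
      rw [PySem.Int.floordiv_eq_ediv_of_pos hdpos, PySem.Int.mod_eq_emod_of_pos hdpos,
          PySem.Int.floordiv_eq_ediv_of_pos hdpos, PySem.Int.mod_eq_emod_of_pos hdpos]
      have hdiv : r / lot = (r - lot) / lot + 1 := by
        conv_lhs => rw [show r = (r - lot) + 1 * lot by ring]
        rw [Int.add_mul_ediv_right _ _ (by omega : lot ≠ 0)]
      have hmod : r % lot = (r - lot) % lot := by
        conv_lhs => rw [show r = (r - lot) + 1 * lot by ring]
        simp
      have hqnn : 0 ≤ (r - lot) / lot := Int.ediv_nonneg (by omega) (by omega)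
      rw [hdiv, hmod]
      have htn : ((r - lot) / lot + 1).toNat = ((r - lot) / lot).toNat + 1 := by omega
      rw [htn, List.replicate_succ]
      simp

-- ===== VERDICT (by name: the statement is the Claim_ definition above) =====
theorem split_quantity_py_spec : Claim_equal_split_quantity_py := by
  intro total lot _
  unfold Spec_split_quantity_py split_quantity_py split_quantity_py_alt
  by_cases hl : lot ≤ 0
  · simp [hl]
  · simp only [hl, dite_false, if_false]
    by_cases ht : total ≤ 0
    · rw [pvALoop.eq_def]
      simp [show ¬ (0:Int) < total by omega, ht]
    · simp only [ht, if_false]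
      exact pvALoop_eq lot (by omega) total.toNat total le_rfl (by omega)
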